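-- pv_equiv track=rewrite | github.com/isleym9447/CTS285 | Streamlit/IntrospectiveImmersion/pages/archetype_quiz.py | calculate_archetype
-- ===== SOURCE A (Python) =====
-- def calculate_archetype(results: dict[str, int]) -> tuple[str, int]:
--     """
--     Calculates the user's primary archetype from the quiz results.
--     """
--     if not results or all(v == 0 for v in results.values()):
--         return ("Undetermined", 0)
--
--     primary_archetype = max(results, key=results.get)
--     max_score = results[primary_archetype]
--
--     tied_archetypes = [k for k, v in results.items() if v == max_score]
--     if len(tied_archetypes) > 1:
--         return (f"Tied ({' & '.join(tied_archetypes)})", max_score)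
--
--     return (primary_archetype, max_score)
-- ===== SOURCE B (Python) =====
-- def calculate_archetype(results: dict[str, int]) -> tuple[str, int]:
--     best = None
--     tied = []
--     all_zero = True
--     for k, v in results.items():
--         if v != 0:
--             all_zero = False
--         if best is None or v > best:
--             best = v
--             tied = [k]
--         elif v == best:
--             tied.append(k)
--     if best is None or all_zero:
--         return ("Undetermined", 0)
--     if len(tied) > 1:
--         return (f"Tied ({' & '.join(tied)})", best)
--     return (tied[0], best)
-- ===== Notes on version B (the rewrite author's own statement) =====
-- stated objective: alternative
-- what changed: A makes three passes (an all-zero scan, max over keys via dict lookups, then a tie-filter comprehension); B is a single explicit loop over the items that maintains the best score, the list of tied keys and an all-zero flag.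
import Mathlib
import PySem

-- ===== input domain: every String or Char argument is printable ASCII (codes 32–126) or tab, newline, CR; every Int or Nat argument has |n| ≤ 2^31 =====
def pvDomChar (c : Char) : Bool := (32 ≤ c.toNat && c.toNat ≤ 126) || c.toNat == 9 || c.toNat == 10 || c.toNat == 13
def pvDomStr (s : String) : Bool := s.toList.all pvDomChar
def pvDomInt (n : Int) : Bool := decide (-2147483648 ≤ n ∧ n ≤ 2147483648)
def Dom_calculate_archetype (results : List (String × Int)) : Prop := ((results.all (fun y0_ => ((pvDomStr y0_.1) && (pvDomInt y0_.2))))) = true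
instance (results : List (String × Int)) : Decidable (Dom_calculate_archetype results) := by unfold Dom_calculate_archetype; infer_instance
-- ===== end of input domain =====

-- B replaces A's three passes (all-zero scan, max-by-lookup, tie filter) by one explicit
-- loop over the items maintaining best score, tied keys and an all-zero flag (objective:
-- alternative single-pass decomposition; no measured speed claim).

-- ===== PORT A =====
-- results.get k (first-match lookup); every key passed to it below is a key of the dict,
-- so the Option layer of .get is elided with default 0 (exact on such inputs).
def pyGetV (results : List (String × Int)) (k : String) : Int :=
  (((results.find? (fun p => p.1 == k)).map Prod.snd).getD 0)

def calculate_archetype (results : List (String × Int)) : String × Int :=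
  if results.isEmpty || results.all (fun p => p.2 == 0) then ("Undetermined", 0)
  else
    -- max(results, key=results.get): first maximal key under the lookup key function
    let primary := (PySem.List.max? (results.map Prod.fst) (pyGetV results)).getD ""
    let max_score := pyGetV results primary
    let tied := (results.filter (fun p => p.2 == max_score)).map Prod.fst
    if tied.length > 1 then
      ("Tied (" ++ PySem.Str.join " & " tied ++ ")", max_score)
    else
      (primary, max_score)

-- ===== PORT B =====
-- loop state: (best score so far, tied keys so far, all-values-zero-so-far flag)
def altStep (st : Option Int × List String × Bool) (p : String × Int) :
    Option Int × List String × Bool :=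
  let az := if p.2 != 0 then false else st.2.2
  match st.1 with
  | none => (some p.2, [p.1], az)
  | some b =>
      if p.2 > b then (some p.2, [p.1], az)
      else if p.2 == b then (some b, st.2.1 ++ [p.1], az)
      else (some b, st.2.1, az)

def calculate_archetype_alt (results : List (String × Int)) : String × Int :=
  let st := results.foldl altStep (none, [], true)
  match st.1 with
  | none => ("Undetermined", 0)
  | some b =>
      if st.2.2 then ("Undetermined", 0)
      else if st.2.1.length > 1 then
        ("Tied (" ++ PySem.Str.join " & " st.2.1 ++ ")", b)
      else
        (st.2.1.headI, b)  -- tied[0]; tied is nonempty whenever best is not None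

-- ===== PRECONDITION & SPEC =====
-- Pre_ excludes association lists with duplicate keys: they encode no Python dict
-- (dict[str,int] keys are unique), so A is never run on such an input; no input A
-- actually accepts is excluded.
def Pre_calculate_archetype (results : List (String × Int)) : Prop :=
  (results.map Prod.fst).Nodup
instance (results : List (String × Int)) : Decidable (Pre_calculate_archetype results) := by
  unfold Pre_calculate_archetype; infer_instance

def pvWitness_calculate_archetype : (List (String × Int)) := [("Sage", 3), ("Hero", 3), ("Rebel", -1)]

def Spec_calculate_archetype (results : List (String × Int)) (out : String × Int) : Prop := out = calculate_archetype_alt results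
instance (results : List (String × Int)) (out : String × Int) : Decidable (Spec_calculate_archetype results out) := by unfold Spec_calculate_archetype; infer_instance

-- ===== CLAIM (what is proved, stated in full; the proofs are below) =====
def Claim_equal_calculate_archetype : Prop := ∀ (results : List (String × Int)), Dom_calculate_archetype results → Pre_calculate_archetype results → Spec_calculate_archetype results (calculate_archetype results)

-- ===== LEMMAS AND PROOFS =====

-- running max of the values, seeded with b
def runMax (l : List (String × Int)) (b : Int) : Int :=
  l.foldl (fun a p => max a p.2) b

lemma runMax_ge (l : List (String × Int)) (b : Int) :
    b ≤ runMax l b ∧ ∀ p ∈ l, p.2 ≤ runMax l b := by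
  have h := PySem.List.le_foldl_max_int l (fun p => p.2) b
  exact ⟨h.1, fun p hp => h.2 p hp⟩

lemma runMax_mem (l : List (String × Int)) (b : Int) :
    runMax l b = b ∨ ∃ p ∈ l, p.2 = runMax l b := by
  have : runMax l b = (l.map Prod.snd).foldl max b := by
    simp [runMax, List.foldl_map]
  rw [this]
  rcases PySem.List.foldl_max_mem (l.map Prod.snd) b with h | h
  · exact Or.inl h
  · right
    rcases List.mem_map.mp h with ⟨p, hp, hv⟩
    exact ⟨p, hp, hv⟩

-- step equations for B's loop
lemma altStep_none (t : List String) (az : Bool) (p : String × Int) :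
    altStep (none, t, az) p = (some p.2, [p.1], az && (p.2 == 0)) := by
  obtain ⟨k, v⟩ := p
  by_cases hv : v = 0 <;> simp [altStep, hv]

lemma altStep_gt (b : Int) (t : List String) (az : Bool) (p : String × Int) (h : b < p.2) :
    altStep (some b, t, az) p = (some p.2, [p.1], az && (p.2 == 0)) := by
  obtain ⟨k, v⟩ := p
  simp only at h
  have h1 : (v > b) = True := by simp; omega
  simp [altStep, h1, Bool.and_comm]
  cases az <;> by_cases hv : v = 0 <;> simp [hv]

lemma altStep_eq (b : Int) (t : List String) (az : Bool) (k : String) :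
    altStep (some b, t, az) (k, b) = (some b, t ++ [k], az && (b == 0)) := by
  by_cases hv : b = 0 <;> simp [altStep, hv]

lemma altStep_lt (b : Int) (t : List String) (az : Bool) (p : String × Int) (h : p.2 < b) :
    altStep (some b, t, az) p = (some b, t, az && (p.2 == 0)) := by
  obtain ⟨k, v⟩ := p
  simp only at h
  have h1 : (v > b) = False := by simp; omega
  have h2 : (v == b) = false := by simp; omega
  simp [altStep, h1, h2, Bool.and_comm]
  cases az <;> by_cases hv : v = 0 <;> simp [hv]

-- characterization of B's fold once best is set
lemma altLoop_some (l : List (String × Int)) (b : Int) (t : List String) (az : Bool) :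
    l.foldl altStep (some b, t, az) =
      (some (runMax l b),
       (if b < runMax l b then (l.filter (fun p => p.2 == runMax l b)).map Prod.fst
        else t ++ (l.filter (fun p => p.2 == b)).map Prod.fst),
       az && l.all (fun p => p.2 == 0)) := by
  induction l generalizing b t az with
  | nil => simp [runMax]
  | cons p rest ih =>
    obtain ⟨k, v⟩ := p
    have hM : runMax ((k, v) :: rest) b = runMax rest (max b v) := by simp [runMax]
    have hge := (runMax_ge rest (max b v)).1
    rcases lt_trichotomy b v with h1 | h1 | h1
    · -- strict improvement: tied resets to [k]
      have hmax : max b v = v := by omega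
      rw [List.foldl_cons, altStep_gt b t az (k, v) h1, ih, hM, hmax]
      rw [hmax] at hge
      have houter : b < runMax rest v := by omega
      rw [if_pos houter]
      rcases lt_or_eq_of_le hge with hvlt | hveq
      · have hne : (v == runMax rest v) = false := by simp; omega
        simp [hvlt, hne, Bool.and_assoc]
      · rw [← hveq]
        simp [Bool.and_assoc]
    · -- equal value: k is appended to tied
      subst h1
      have hmax : max b b = b := by omega
      rw [List.foldl_cons, altStep_eq b t az k, ih, hM, hmax]
      rw [hmax] at hge
      rcases lt_or_eq_of_le hge with hblt | hbeq
      · have hne : (b == runMax rest b) = false := by simp; omega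
        simp [hblt, hne, Bool.and_assoc]
      · rw [← hbeq]
        simp [Bool.and_assoc]
    · -- smaller value: state unchanged
      have hmax : max b v = b := by omega
      rw [List.foldl_cons, altStep_lt b t az (k, v) h1, ih, hM, hmax]
      rw [hmax] at hge
      have hne : ∀ m : Int, v < m → (v == m) = false := by intro m hm; simp; omega
      by_cases h3 : b < runMax rest b
      · simp [h3, (show v ≠ runMax rest b by omega), Bool.and_assoc]
      · simp [h3, (show v ≠ b by omega), Bool.and_assoc]

-- first-match lookup on a nodup association list returns the pair's own value
lemma pyGetV_of_mem (results : List (String × Int)) (hnd : (results.map Prod.fst).Nodup)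
    (p : String × Int) (hp : p ∈ results) : pyGetV results p.1 = p.2 := by
  induction results with
  | nil => cases hp
  | cons q rest ih =>
    simp only [List.map_cons, List.nodup_cons] at hnd
    rcases List.mem_cons.mp hp with rfl | hmem
    · simp [pyGetV]
    · have hne : (q.1 == p.1) = false := by
        simp only [beq_eq_false_iff_ne, ne_eq]
        intro h
        exact hnd.1 (h ▸ List.mem_map.mpr ⟨p, hmem, rfl⟩)
      simp only [pyGetV, List.find?_cons, hne]
      exact ih hnd.2 hmem

-- B's full fold on a nonempty list
lemma altFold_cons (k0 : String) (v0 : Int) (rest : List (String × Int)) :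
    ((k0, v0) :: rest).foldl altStep (none, [], true) =
      (some (runMax rest v0),
       (if v0 < runMax rest v0
        then (rest.filter (fun p => p.2 == runMax rest v0)).map Prod.fst
        else [k0] ++ (rest.filter (fun p => p.2 == v0)).map Prod.fst),
       ((k0, v0) :: rest).all (fun p => p.2 == 0)) := by
  rw [List.foldl_cons, altStep_none, altLoop_some]
  simp [List.all_cons]

-- B's tied list is the filter of the WHOLE list by the overall max
lemma tied_eq (k0 : String) (v0 : Int) (rest : List (String × Int)) :
    (if v0 < runMax rest v0
     then (rest.filter (fun p => p.2 == runMax rest v0)).map Prod.fst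
     else [k0] ++ (rest.filter (fun p => p.2 == v0)).map Prod.fst) =
    (((k0, v0) :: rest).filter (fun p => p.2 == runMax rest v0)).map Prod.fst := by
  have hge := (runMax_ge rest v0).1
  rcases lt_or_eq_of_le hge with hlt | heq
  · simp [hlt, (show v0 ≠ runMax rest v0 by omega)]
  · simp [← heq]

theorem calculate_archetype_spec : Claim_equal_calculate_archetype := by
  intro results _ hpre
  unfold Spec_calculate_archetype
  cases results with
  | nil => rfl
  | cons p rest =>
    obtain ⟨k0, v0⟩ := p
    by_cases hz : ((k0, v0) :: rest).all (fun p => p.2 == 0)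
    · -- all values zero: both return ("Undetermined", 0)
      have hB : calculate_archetype_alt ((k0, v0) :: rest) = ("Undetermined", 0) := by
        simp only [calculate_archetype_alt, altFold_cons]
        simp [hz]
      rw [hB]
      simp [calculate_archetype, hz]
    · -- some value nonzero
      have hzf : ((k0, v0) :: rest).all (fun p => p.2 == 0) = false :=
        Bool.not_eq_true _ ▸ eq_false_of_ne_true hz
      -- B's value
      have hB : calculate_archetype_alt ((k0, v0) :: rest) =
          (if ((((k0, v0) :: rest).filter
                (fun p => p.2 == runMax rest v0)).map Prod.fst).length > 1 then
             ("Tied (" ++ PySem.Str.join " & "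
               ((((k0, v0) :: rest).filter
                 (fun p => p.2 == runMax rest v0)).map Prod.fst) ++ ")", runMax rest v0)
           else (((((k0, v0) :: rest).filter
                 (fun p => p.2 == runMax rest v0)).map Prod.fst).headI, runMax rest v0)) := by
        simp only [calculate_archetype_alt, altFold_cons, tied_eq]
        simp [hzf]
      -- A's max? over the keys returns some pk
      obtain ⟨pk, hpk⟩ : ∃ pk,
          PySem.List.max? (((k0, v0) :: rest).map Prod.fst)
            (pyGetV ((k0, v0) :: rest)) = some pk := by
        cases h : PySem.List.max? (((k0, v0) :: rest).map Prod.fst)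
            (pyGetV ((k0, v0) :: rest)) with
        | none => rw [PySem.List.max?_eq_none_iff] at h; simp at h
        | some x => exact ⟨x, rfl⟩
      have hlook := pyGetV_of_mem ((k0, v0) :: rest) hpre
      -- pk is the key of some pair q of the list
      obtain ⟨q, hqmem, hqk⟩ := List.mem_map.mp (PySem.List.max?_mem hpk)
      -- A's max_score = value of q
      have hms : pyGetV ((k0, v0) :: rest) pk = q.2 := by rw [← hqk]; exact hlook q hqmem
      -- max_score bounds every value
      have hub : ∀ r ∈ (k0, v0) :: rest, r.2 ≤ pyGetV ((k0, v0) :: rest) pk := by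
        intro r hr
        have := PySem.List.max?_isMax hpk r.1 (List.mem_map.mpr ⟨r, hr, rfl⟩)
        rwa [hlook r hr] at this
      -- max_score = runMax rest v0
      have hmax : pyGetV ((k0, v0) :: rest) pk = runMax rest v0 := by
        have h1 : q.2 ≤ runMax rest v0 := by
          rcases List.mem_cons.mp hqmem with rfl | hmem
          · exact (runMax_ge rest v0).1
          · exact (runMax_ge rest v0).2 q hmem
        have h2 : runMax rest v0 ≤ pyGetV ((k0, v0) :: rest) pk := by
          rcases runMax_mem rest v0 with hc | ⟨r, hrmem, hrv⟩
          · rw [hc]; exact hub (k0, v0) List.mem_cons_self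
          · rw [← hrv]; exact hub r (List.mem_cons_of_mem _ hrmem)
        omega
      have hqM : q.2 = runMax rest v0 := by omega
      -- A's value
      have hA : calculate_archetype ((k0, v0) :: rest) =
          (if ((((k0, v0) :: rest).filter
                (fun p => p.2 == runMax rest v0)).map Prod.fst).length > 1 then
             ("Tied (" ++ PySem.Str.join " & "
               ((((k0, v0) :: rest).filter
                 (fun p => p.2 == runMax rest v0)).map Prod.fst) ++ ")", runMax rest v0)
           else (pk, runMax rest v0)) := by
        simp only [calculate_archetype, List.isEmpty_cons, hzf, Bool.or_self,
          Bool.false_eq_true, if_false, hpk, Option.getD_some, hmax]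
      -- pk is in the tied list
      have hpkmem : pk ∈ (((k0, v0) :: rest).filter
          (fun p => p.2 == runMax rest v0)).map Prod.fst :=
        List.mem_map.mpr ⟨q, List.mem_filter.mpr ⟨hqmem, by simp [hqM]⟩, hqk⟩
      rw [hA, hB]
      revert hpkmem
      generalize (((k0, v0) :: rest).filter
          (fun p => p.2 == runMax rest v0)).map Prod.fst = tied
      intro hpkmem
      rcases tied with _ | ⟨x, _ | ⟨y, ys⟩⟩
      · cases hpkmem
      · simp at hpkmem
        simp [hpkmem]
      · rfl
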